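-- pv_equiv track=rewrite | github.com/JackCai1206/transformer_arithmetic_v2 | lib/data_formats.py | get_cumsum_gt5
-- ===== SOURCE A (Python) =====
-- def get_cumsum_gt5(a):
--     a_rev = a[::-1]
--     cot = ''
--     s = 0
--     for ai in a_rev:
--         s += int(ai)
--         s = s % 10
--         if s >= 5:
--             cot += '1'
--         else:
--             cot += '0'
--     return f'{a_rev}=', cot, None
-- ===== SOURCE B (Python) =====
-- def get_cumsum_gt5(a):
--     # Recurse on the original string: the recursion returns the raw digit sum of a
--     # suffix of a and the bits for that suffix, built back-to-front (cot reversed).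
--     def go(chars):
--         if not chars:
--             return 0, []
--         s, bits = go(chars[1:])
--         s += int(chars[0])
--         return s, ['1' if s % 10 >= 5 else '0'] + bits
--     _, bits = go(list(a))
--     return a[::-1] + '=', ''.join(reversed(bits)), None
-- ===== Notes on version B (the rewrite author's own statement) =====
-- stated objective: alternative
-- what changed: B replaces A's left-to-right loop over the reversed string carrying a mod-10 residue by structural recursion on the original string: each recursive call returns the raw suffix digit sum and the bit string built back-to-front, reversed once at the end (correct because mod 10 distributes over addition and cot's i-th bit depends only on the sum of a's last i+1 digits).
import Mathlib
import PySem

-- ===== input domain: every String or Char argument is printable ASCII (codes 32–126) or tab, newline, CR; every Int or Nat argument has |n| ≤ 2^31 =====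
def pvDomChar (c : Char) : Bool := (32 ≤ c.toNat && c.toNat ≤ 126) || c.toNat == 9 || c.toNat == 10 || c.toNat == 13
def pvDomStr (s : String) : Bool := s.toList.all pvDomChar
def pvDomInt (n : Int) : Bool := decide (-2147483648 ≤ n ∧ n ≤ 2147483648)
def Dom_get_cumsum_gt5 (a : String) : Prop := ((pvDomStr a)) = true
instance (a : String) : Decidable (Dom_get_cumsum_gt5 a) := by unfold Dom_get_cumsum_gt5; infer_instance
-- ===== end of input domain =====

-- B recurses on the original string computing raw suffix digit sums, building the bits
-- back-to-front and reversing once, instead of A's residue-carrying loop over the reversal.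


-- ===== PORT A =====
-- loop body of A: s += int(ai); s %= 10; cot += '1'/'0'
-- int(ai) via PySem.Int.ofChars?; the .getD 0 is unreachable under Pre_ (Python raises ValueError there)
def stepA (st : List Char × Int) (ai : Char) : List Char × Int :=
  let s := st.2 + (PySem.Int.ofChars? [ai]).getD 0
  let s := PySem.Int.mod s 10
  (if s ≥ 5 then st.1 ++ ['1'] else st.1 ++ ['0'], s)

def get_cumsum_gt5 (a : String) : String × String × Option String :=
  -- a_rev = a[::-1]; loop = foldl of stepA over a_rev
  (String.ofList (a.toList.reverse ++ ['=']),
   String.ofList (a.toList.reverse.foldl stepA ([], 0)).1, none)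

-- ===== PORT B =====
-- go(chars): structural recursion, returns (raw suffix digit sum, bits back-to-front)
def goB : List Char → Int × List Char
  | [] => (0, [])
  | ch :: rest =>
    let r := goB rest
    let s := r.1 + (PySem.Int.ofChars? [ch]).getD 0
    (s, (if PySem.Int.mod s 10 ≥ 5 then '1' else '0') :: r.2)

def get_cumsum_gt5_alt (a : String) : String × String × Option String :=
  (String.ofList (a.toList.reverse ++ ['=']),
   String.ofList (goB a.toList).2.reverse, none)

-- ===== PRECONDITION & SPEC =====
-- Pre_ excludes exactly the strings containing a non-digit, on which Python's int(ai) raises ValueError.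
def Pre_get_cumsum_gt5 (a : String) : Prop := a.toList.all Char.isDigit = true
instance (a : String) : Decidable (Pre_get_cumsum_gt5 a) := by unfold Pre_get_cumsum_gt5; infer_instance
def pvWitness_get_cumsum_gt5 : String := "4321"

def Spec_get_cumsum_gt5 (a : String) (out : String × String × Option String) : Prop := out = get_cumsum_gt5_alt a
instance (a : String) (out : String × String × Option String) : Decidable (Spec_get_cumsum_gt5 a out) := by unfold Spec_get_cumsum_gt5; infer_instance

-- ===== CLAIM =====
def Claim_equal_get_cumsum_gt5 : Prop := ∀ (a : String), Dom_get_cumsum_gt5 a → Pre_get_cumsum_gt5 a → Spec_get_cumsum_gt5 a (get_cumsum_gt5 a)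

-- ===== LEMMAS AND PROOFS =====

-- reference: bits of a list processed left-to-right with raw running total t
def cref : List Char → Int → List Char
  | [], _ => []
  | c :: l, t =>
    let t' := t + (PySem.Int.ofChars? [c]).getD 0
    (if PySem.Int.mod t' 10 ≥ 5 then '1' else '0') :: cref l t'

def dsum (l : List Char) : Int := (l.map (fun c => (PySem.Int.ofChars? [c]).getD 0)).sum

theorem cref_append (xs ys : List Char) (t : Int) :
    cref (xs ++ ys) t = cref xs t ++ cref ys (t + dsum xs) := by
  induction xs generalizing t with
  | nil => simp [cref, dsum]
  | cons c xs ih =>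
    simp only [List.cons_append, cref, ih, dsum, List.map_cons, List.sum_cons]
    ring_nf

-- A's loop equals cref: invariant s = (running total) mod 10
theorem foldA_cref (l : List Char) (cot : List Char) (s t : Int)
    (hs : s = PySem.Int.mod t 10) :
    (l.foldl stepA (cot, s)).1 = cot ++ cref l t := by
  induction l generalizing cot s t with
  | nil => simp [cref]
  | cons c l ih =>
    have h10 : (0 : Int) < 10 := by norm_num
    simp only [List.foldl_cons, stepA, cref]
    have he : PySem.Int.mod (s + (PySem.Int.ofChars? [c]).getD 0) 10
            = PySem.Int.mod (t + (PySem.Int.ofChars? [c]).getD 0) 10 := by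
      simp only [hs, PySem.Int.mod_eq_emod_of_pos h10]; omega
    rw [he]
    split
    · rw [ih _ _ (t + (PySem.Int.ofChars? [c]).getD 0) rfl]; simp
    · rw [ih _ _ (t + (PySem.Int.ofChars? [c]).getD 0) rfl]; simp

-- B's recursion: sum component and reversed bits against cref of the reversal
theorem goB_spec (l : List Char) :
    goB l = (dsum l, (cref l.reverse 0).reverse) := by
  induction l with
  | nil => simp [goB, dsum, cref]
  | cons c l ih =>
    simp only [goB, ih, List.reverse_cons, cref_append, cref, dsum, List.map_cons,
      List.sum_cons, List.reverse_append]
    rw [Prod.mk.injEq]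
    refine ⟨by ring, ?_⟩
    norm_num [dsum]

-- ===== VERDICT =====
theorem get_cumsum_gt5_spec : Claim_equal_get_cumsum_gt5 := by
  intro a _ _
  unfold Spec_get_cumsum_gt5 get_cumsum_gt5 get_cumsum_gt5_alt
  rw [goB_spec, foldA_cref a.toList.reverse [] 0 0 (by decide)]
  simp
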